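-- pv_equiv track=rewrite | github.com/kpto/ClusterSheep | src/ClusterSheep/prcs/template.py | _draw_frame
-- ===== SOURCE A (Python) =====
-- def _draw_frame(lines):
--     ranges = []
--     counter = 0
--     begin_found = False
--     begin = 0
--     while counter < len(lines):
--         line = lines[counter]
--         if begin_found:
--             if line.startswith('### FRAME END'):
--                 end = counter
--                 ranges.append((begin, end))
--                 begin_found = False
--         else:
--             if line.startswith('### FRAME BEGIN'):
--                 begin = counter
--                 begin_found = True
--         counter += 1
--     for r in ranges:
--         longest = max(map(len, lines[r[0]+1:r[1]]))
--         lines[r[0]] = lines[r[1]] = '# ' + '+' + '-'*longest + '+'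
--         for n in range(r[0]+1, r[1]):
--             lines[n] = '# ' + '|' + lines[n] + ' '*(longest-len(lines[n])) + '|'
--     return lines
-- ===== SOURCE B (Python) =====
-- def _draw_frame(lines):
--     # Single pass with look-ahead: on an opening BEGIN, scan forward to the matching END,
--     # emit the framed block at once, jump past it.  Builds a NEW output list (A mutates
--     # `lines` in place and returns it); equivalence is about the return value.
--     out = []
--     i = 0
--     n = len(lines)
--     while i < n:
--         if lines[i].startswith('### FRAME BEGIN'):
--             j = i + 1
--             while j < n and not lines[j].startswith('### FRAME END'):
--                 j += 1
--             if j == n: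
--                 # unmatched BEGIN: no END exists anywhere later, so nothing more is framed
--                 out.extend(lines[i:])
--                 return out
--             body = lines[i+1:j]
--             w = max(len(s) for s in body)
--             border = '# +' + '-' * w + '+'
--             out.append(border)
--             out.extend('# |' + s.ljust(w) + '|' for s in body)
--             out.append(border)
--             i = j + 1
--         else:
--             out.append(lines[i])
--             i += 1
--     return out
-- ===== Notes on version B (the rewrite author's own statement) =====
-- stated objective: alternative
-- what changed: A scans statefully to collect a (begin,end) ranges table and then a second loop mutates the input list in place with index assignments; B is a single look-ahead pass that, at each opening BEGIN marker, scans forward to the matching END and emits the whole framed block into a new output list at once - no ranges table, no index assignment, no mutation of the argument.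
import Mathlib
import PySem

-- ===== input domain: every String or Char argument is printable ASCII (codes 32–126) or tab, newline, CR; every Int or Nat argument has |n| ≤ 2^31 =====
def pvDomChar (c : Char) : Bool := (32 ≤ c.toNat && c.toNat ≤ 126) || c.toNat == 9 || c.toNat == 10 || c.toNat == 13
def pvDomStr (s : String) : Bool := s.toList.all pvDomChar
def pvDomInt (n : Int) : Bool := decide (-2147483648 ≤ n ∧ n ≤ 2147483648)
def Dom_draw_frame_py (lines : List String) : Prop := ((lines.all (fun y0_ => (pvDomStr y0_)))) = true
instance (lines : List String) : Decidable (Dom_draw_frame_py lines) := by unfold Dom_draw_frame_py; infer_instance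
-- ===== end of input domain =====

-- B replaces A's two phases (collect a ranges table by a stateful scan, then a second loop
-- mutating the list in place with index assignments) by a single look-ahead pass that builds a
-- NEW output list block by block; A mutates its argument and returns it, B does not mutate —
-- equivalence is about the return value.


-- ===== PORT A =====
-- Drawing one frame (A's `for r in ranges` body).  String concatenation and '-'*n / ' '*n are
-- ported exactly on the character lists; lines[r0+1:r1] is (drop (b+1)).take (e-(b+1)) per
-- PySem.List.slice_natCast; Python's max() raises ValueError when a frame has a zero-line
-- interior — excluded by Pre_ — the port then uses the junk default 0.  The assignments lines[i]=… are List.set: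
-- exact because the scan only yields indices < lines.length.
def pvDrawA (ls : List String) (b e : Nat) : List String :=
  let longest := (PySem.List.max? (((ls.drop (b+1)).take (e - (b+1))).map (fun s => s.toList.length)) (fun y => y)).getD 0
  let border := String.ofList ('#' :: ' ' :: ('+' :: (List.replicate longest '-' ++ ['+'])))
  let ls := (ls.set b border).set e border
  (List.range' (b+1) (e - (b+1))).foldl
    (fun acc n =>
      acc.set n (String.ofList ('#' :: ' ' :: ('|' :: ((acc.getD n "").toList
        ++ List.replicate (longest - (acc.getD n "").toList.length) ' ' ++ ['|']))))) ls

-- A's while loop: collect the (begin, end) ranges.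
def pvScanA (lines : List String) (counter : Nat) (bf : Bool) (b : Nat)
    (ranges : List (Nat × Nat)) : List (Nat × Nat) :=
  if h : counter < lines.length then
    -- Python binds `line = lines[counter]`; inlined here
    if bf then
      if PySem.Str.startswith lines[counter] "### FRAME END" then
        pvScanA lines (counter + 1) false b (ranges ++ [(b, counter)])
      else pvScanA lines (counter + 1) true b ranges
    else
      if PySem.Str.startswith lines[counter] "### FRAME BEGIN" then
        pvScanA lines (counter + 1) true counter ranges
      else pvScanA lines (counter + 1) false b ranges
  else ranges
termination_by lines.length - counter

def draw_frame_py (lines : List String) : List String :=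
  (pvScanA lines 0 false 0 []).foldl (fun acc r => pvDrawA acc r.1 r.2) lines

-- ===== PORT B =====
-- Source B's inner look-ahead loop: first index j' ≥ j with an END marker (lines.length if none).
def pvFindEnd (lines : List String) (j : Nat) : Nat :=
  if h : j < lines.length then
    if PySem.Str.startswith lines[j] "### FRAME END" then j else pvFindEnd lines (j + 1)
  else j
termination_by lines.length - j

lemma pvFindEnd_ge (lines : List String) (j : Nat) : j ≤ pvFindEnd lines j := by
  have H : ∀ n j, lines.length - j ≤ n → j ≤ pvFindEnd lines j := by
    intro n
    induction n with
    | zero =>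
        intro j hj
        rw [pvFindEnd, dif_neg (by omega)]
    | succ m ih =>
        intro j hj
        rw [pvFindEnd]
        split
        · split
          · exact le_refl _
          · exact le_trans (by omega) (ih (j + 1) (by omega))
        · exact le_refl _
  exact H (lines.length - j) j le_rfl

-- Source B's outer while loop; `out` is the output list being built.
def pvGoB (lines : List String) (i : Nat) (out : List String) : List String :=
  if h : i < lines.length then
    if PySem.Str.startswith lines[i] "### FRAME BEGIN" then
      let j := pvFindEnd lines (i + 1)
      if hj : j < lines.length then
        let body := (lines.drop (i + 1)).take (j - (i + 1))
        let w := (PySem.List.max? (body.map (fun s => s.toList.length)) (fun y => y)).getD 0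
        let border := String.ofList (['#', ' ', '+'] ++ List.replicate w '-' ++ ['+'])
        pvGoB lines (j + 1)
          (out ++ border :: body.map (fun s =>
            String.ofList (['#', ' ', '|'] ++ (s.toList ++ List.replicate (w - s.toList.length) ' ') ++ ['|'])) ++ [border])
      else out ++ lines.drop i      -- unmatched BEGIN: extend with the rest and return
    else pvGoB lines (i + 1) (out ++ [lines[i]])
  else out
termination_by lines.length - i
decreasing_by
  · have := pvFindEnd_ge lines (i + 1); omega
  · omega

def draw_frame_py_alt (lines : List String) : List String := pvGoB lines 0 []

-- ===== PRECONDITION & SPEC =====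
-- Pre_ excludes exactly the inputs on which Python A raises ValueError (max() over the
-- zero-line interior of a frame): a line starting '### FRAME BEGIN' that actually OPENS a frame (no frame already
-- open, i.e. no earlier BEGIN with no END in between) immediately followed by a
-- '### FRAME END' line.  Python B raises there too.
def Pre_draw_frame_py (lines : List String) : Prop :=
  ∀ i, i < lines.length →
    (i + 1 < lines.length ∧
     PySem.Str.startswith (lines.getD i "") "### FRAME BEGIN" = true ∧
     PySem.Str.startswith (lines.getD (i + 1) "") "### FRAME END" = true) →
    ∃ j, j < i ∧ PySem.Str.startswith (lines.getD j "") "### FRAME BEGIN" = true ∧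
      ∀ k, k < i → j < k → PySem.Str.startswith (lines.getD k "") "### FRAME END" = false
instance (lines : List String) : Decidable (Pre_draw_frame_py lines) := by
  unfold Pre_draw_frame_py; infer_instance

def pvWitness_draw_frame_py : List String := ["### FRAME BEGIN", "hi", "### FRAME END"]

def Spec_draw_frame_py (lines : List String) (out : List String) : Prop := out = draw_frame_py_alt lines
instance (lines : List String) (out : List String) : Decidable (Spec_draw_frame_py lines out) := by
  unfold Spec_draw_frame_py; infer_instance

-- ===== CLAIM (what is proved, stated in full; the proofs are below) =====
def Claim_equal_draw_frame_py : Prop := ∀ (lines : List String), Dom_draw_frame_py lines → Pre_draw_frame_py lines → Spec_draw_frame_py lines (draw_frame_py lines)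

-- ===== LEMMAS AND PROOFS =====

-- Shared shapes of the produced strings (proof-side names; both ports spell them out inline).
def pvBorder (w : Nat) : String :=
  String.ofList (['#', ' ', '+'] ++ List.replicate w '-' ++ ['+'])
def pvRow (w : Nat) (s : String) : String :=
  String.ofList (['#', ' ', '|'] ++ (s.toList ++ List.replicate (w - s.toList.length) ' ') ++ ['|'])
def pvW (ls : List String) (b e : Nat) : Nat :=
  (PySem.List.max? (((ls.drop (b + 1)).take (e - (b + 1))).map (fun s => s.toList.length)) (fun y => y)).getD 0

-- What both programs print for one frame (b, e), plus the untouched tail.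
def pvRender (ls : List String) (i : Nat) : List String :=
  if h : i < ls.length then
    if PySem.Str.startswith ls[i] "### FRAME BEGIN" then
      if hj : pvFindEnd ls (i + 1) < ls.length then
        pvBorder (pvW ls i (pvFindEnd ls (i + 1)))
          :: ((ls.drop (i + 1)).take (pvFindEnd ls (i + 1) - (i + 1))).map
               (pvRow (pvW ls i (pvFindEnd ls (i + 1))))
          ++ pvBorder (pvW ls i (pvFindEnd ls (i + 1))) :: pvRender ls (pvFindEnd ls (i + 1) + 1)
      else ls.drop i
    else ls[i] :: pvRender ls (i + 1)
  else []
termination_by ls.length - i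
decreasing_by
  · have := pvFindEnd_ge ls (i + 1); omega
  · omega

lemma foldl_set_length {α : Type} (idx : List Nat) (f : List α → Nat → α) (ls : List α) :
    (idx.foldl (fun acc n => acc.set n (f acc n)) ls).length = ls.length := by
  induction idx generalizing ls with
  | nil => rfl
  | cons n t ih => simp only [List.foldl_cons]; rw [ih]; simp

lemma pvDrawA_length (ls : List String) (b e : Nat) : (pvDrawA ls b e).length = ls.length := by
  simp only [pvDrawA]
  rw [foldl_set_length]
  simp

-- A fold of List.set at indices ≠ i leaves position i unchanged.
lemma foldl_set_getElem? {α : Type} (idx : List Nat) (f : List α → Nat → α) (ls : List α)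
    (i : Nat) (hi : ∀ n ∈ idx, n ≠ i) :
    (idx.foldl (fun acc n => acc.set n (f acc n)) ls)[i]? = ls[i]? := by
  induction idx generalizing ls with
  | nil => rfl
  | cons n t ih =>
      simp only [List.foldl_cons]
      rw [ih _ (fun m hm => hi m (by simp [hm]))]
      exact List.getElem?_set_ne (hi n (by simp))

-- Drawing a frame ending at e touches no index beyond e.
lemma pvDrawA_getElem?_high (ls : List String) (b e i : Nat) (hb : b ≤ e) (hi : e < i) :
    (pvDrawA ls b e)[i]? = ls[i]? := by
  unfold pvDrawA
  rw [foldl_set_getElem? _ _ _ _ (by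
    intro n hn
    have := List.mem_range'.mp hn
    omega)]
  rw [List.getElem?_set_ne (by omega), List.getElem?_set_ne (by omega)]

-- The fold of in-place row rewrites over a contiguous index segment is take/map/drop.
lemma foldl_set_seg (w : Nat) : ∀ (m start : Nat) (ls : List String), start + m ≤ ls.length →
    (List.range' start m).foldl (fun acc n => acc.set n (pvRow w (acc.getD n ""))) ls
      = ls.take start ++ ((ls.drop start).take m).map (pvRow w) ++ ls.drop (start + m) := by
  intro m
  induction m with
  | zero => intro start ls _; simp
  | succ k ih =>
      intro start ls hlen
      have hs : start < ls.length := by omega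
      rw [List.range'_succ, List.foldl_cons,
          ih (start + 1) (ls.set start (pvRow w (ls.getD start ""))) (by simp; omega)]
      rw [List.take_add_one, List.getElem?_set_self (by omega), List.take_set_of_le le_rfl,
          List.drop_set_of_lt (by omega), List.drop_set_of_lt (by omega),
          List.drop_eq_getElem_cons hs, List.take_succ_cons, List.map_cons,
          List.getD_eq_getElem ls "" hs]
      simp [List.append_assoc]
      omega

-- pvDrawA as take/append/drop (b < e < length).
lemma pvDrawA_decomp (ls : List String) (b e : Nat) (hbe : b < e) (he : e < ls.length) :
    pvDrawA ls b e =
      ls.take b ++ pvBorder (pvW ls b e)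
        :: ((ls.drop (b + 1)).take (e - (b + 1))).map (pvRow (pvW ls b e))
        ++ pvBorder (pvW ls b e) :: ls.drop (e + 1) := by
  have h1 : pvDrawA ls b e
      = (List.range' (b + 1) (e - (b + 1))).foldl
          (fun acc n => acc.set n (pvRow (pvW ls b e) (acc.getD n "")))
          ((ls.set b (pvBorder (pvW ls b e))).set e (pvBorder (pvW ls b e))) := rfl
  rw [h1, foldl_set_seg (pvW ls b e) (e - (b + 1)) (b + 1) _ (by simp; omega)]
  have hm : b + 1 + (e - (b + 1)) = e := by omega
  rw [hm]
  -- the prefix: take (b+1) of the two sets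
  rw [List.take_set_of_le (show b + 1 ≤ e by omega), List.take_add_one,
      List.getElem?_set_self (by omega), List.take_set_of_le le_rfl]
  -- the middle slice: indices b+1 … e-1 are untouched by the sets
  rw [show List.drop (b + 1) ((ls.set b (pvBorder (pvW ls b e))).set e (pvBorder (pvW ls b e)))
        = (ls.drop (b + 1)).set (e - (b + 1)) (pvBorder (pvW ls b e)) by
      rw [List.drop_set, if_neg (by omega), List.drop_set_of_lt (by omega)]]
  rw [List.take_set_of_le le_rfl]
  -- the suffix: drop e starts with the border then the untouched tail
  rw [show List.drop e ((ls.set b (pvBorder (pvW ls b e))).set e (pvBorder (pvW ls b e)))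
        = pvBorder (pvW ls b e) :: ls.drop (e + 1) by
      rw [List.drop_eq_getElem_cons (by simp; omega), List.getElem_set_self,
          List.drop_set_of_lt (by omega), List.drop_set_of_lt (by omega)]]
  simp [List.append_assoc]

-- The scan reads only lines[counter:] (and the length).
lemma pvScanA_congr_suffix (n : Nat) (ls ls' : List String) (c : Nat) (bf : Bool) (b : Nat)
    (acc : List (Nat × Nat)) (hn : ls.length - c = n) (hlen : ls.length = ls'.length)
    (hsuf : ∀ i, c ≤ i → ls[i]? = ls'[i]?) :
    pvScanA ls c bf b acc = pvScanA ls' c bf b acc := by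
  induction n generalizing c bf b acc with
  | zero =>
      rw [pvScanA]; rw [dif_neg (by omega)]
      rw [pvScanA]; rw [dif_neg (by omega)]
  | succ m ih =>
      by_cases h : c < ls.length
      · conv_lhs => rw [pvScanA]
        conv_rhs => rw [pvScanA]
        rw [dif_pos h, dif_pos (show c < ls'.length by omega)]
        have hget : ls'[c]'(by omega) = ls[c]'h := by
          have := hsuf c le_rfl
          simp only [List.getElem?_eq_getElem h, List.getElem?_eq_getElem (show c < ls'.length by omega)] at this
          exact (Option.some.inj this).symm
        simp only [hget]
        have ih' := fun bf b acc => ih (c + 1) bf b acc (by omega) (fun i hi => hsuf i (by omega))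
        cases bf <;> simp only [Bool.false_eq_true, if_false, if_true] <;> split <;> exact ih' _ _ _
      · rw [pvScanA]; rw [dif_neg h]
        rw [pvScanA]; rw [dif_neg (by omega)]

-- The ranges accumulator is append-only.
lemma pvScanA_acc (n : Nat) (ls : List String) (c : Nat) (bf : Bool) (b : Nat)
    (acc : List (Nat × Nat)) (hn : ls.length - c = n) :
    pvScanA ls c bf b acc = acc ++ pvScanA ls c bf b [] := by
  induction n generalizing c bf b acc with
  | zero =>
      have hnil : ∀ a : List (Nat × Nat), pvScanA ls c bf b a = a := by
        intro a; rw [pvScanA]; rw [dif_neg (by omega)]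
      rw [hnil, hnil]; simp
  | succ m ih =>
      by_cases h : c < ls.length
      · conv_lhs => rw [pvScanA]
        conv_rhs => rw [pvScanA]
        rw [dif_pos h, dif_pos h]
        have ih' := fun bf b acc => ih (c + 1) bf b acc (by omega)
        cases bf <;> simp only [Bool.false_eq_true, if_false, if_true] <;> split
        · rw [ih' true c acc]
        · rw [ih' false b acc]
        · rw [ih' false b (acc ++ [(b, c)]), ih' false b ([] ++ [(b, c)])]; simp
        · rw [ih' true b acc]
      · have hnil : ∀ a : List (Nat × Nat), pvScanA ls c bf b a = a := by
          intro a; rw [pvScanA]; rw [dif_neg (by omega)]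
        rw [hnil, hnil]; simp

-- In the open state, the scan closes at the first END marker.
lemma pvScanA_open : ∀ (n : Nat) (ls : List String) (c b : Nat), ls.length - c ≤ n →
    pvScanA ls c true b [] =
      if pvFindEnd ls c < ls.length then
        (b, pvFindEnd ls c) :: pvScanA ls (pvFindEnd ls c + 1) false b []
      else [] := by
  intro n
  induction n with
  | zero =>
      intro ls c b h
      rw [pvScanA, dif_neg (by omega), pvFindEnd, dif_neg (by omega), if_neg (by omega)]
  | succ m ih =>
      intro ls c b h
      by_cases hc : c < ls.length
      · rw [pvScanA, dif_pos hc, if_pos rfl]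
        by_cases hE : PySem.Str.startswith ls[c] "### FRAME END" = true
        · rw [if_pos hE,
              pvScanA_acc (ls.length - (c + 1)) ls (c + 1) false b ([] ++ [(b, c)]) rfl]
          have hfe : pvFindEnd ls c = c := by rw [pvFindEnd, dif_pos hc, if_pos hE]
          rw [hfe, if_pos hc]
          simp
        · rw [if_neg hE, ih ls (c + 1) b (by omega)]
          have hfe : pvFindEnd ls c = pvFindEnd ls (c + 1) := by
            rw [pvFindEnd, dif_pos hc, if_neg hE]
          rw [← hfe]
      · rw [pvScanA, dif_neg hc, pvFindEnd, dif_neg hc, if_neg (by omega)]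

-- pvFindEnd reads only lines[j:] (and the length).
lemma pvFindEnd_congr : ∀ (n : Nat) (ls ls' : List String) (c : Nat), ls.length - c ≤ n →
    ls.length = ls'.length → (∀ i, c ≤ i → ls[i]? = ls'[i]?) →
    pvFindEnd ls c = pvFindEnd ls' c := by
  intro n
  induction n with
  | zero =>
      intro ls ls' c h hlen hsuf
      conv_lhs => rw [pvFindEnd]
      conv_rhs => rw [pvFindEnd]
      rw [dif_neg (by omega), dif_neg (by omega)]
  | succ m ih =>
      intro ls ls' c h hlen hsuf
      by_cases hc : c < ls.length
      · have hc' : c < ls'.length := by omega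
        have hget : ls[c]'hc = ls'[c]'hc' := by
          have := hsuf c le_rfl
          simpa [List.getElem?_eq_getElem hc, List.getElem?_eq_getElem hc'] using this
        conv_lhs => rw [pvFindEnd]
        conv_rhs => rw [pvFindEnd]
        rw [dif_pos hc, dif_pos hc']
        simp only [hget]
        split
        · rfl
        · exact ih ls ls' (c + 1) (by omega) hlen (fun i hi => hsuf i (by omega))
      · conv_lhs => rw [pvFindEnd]
        conv_rhs => rw [pvFindEnd]
        rw [dif_neg hc, dif_neg (by omega)]

-- pvRender reads only lines[i:] (and the length).
lemma pvRender_congr : ∀ (n : Nat) (ls ls' : List String) (c : Nat), ls.length - c ≤ n →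
    ls.length = ls'.length → (∀ i, c ≤ i → ls[i]? = ls'[i]?) →
    pvRender ls c = pvRender ls' c := by
  intro n
  induction n with
  | zero =>
      intro ls ls' c h hlen hsuf
      conv_lhs => rw [pvRender]
      conv_rhs => rw [pvRender]
      rw [dif_neg (by omega), dif_neg (by omega)]
  | succ m ih =>
      intro ls ls' c h hlen hsuf
      by_cases hc : c < ls.length
      · have hc' : c < ls'.length := by omega
        have hget : ls[c]'hc = ls'[c]'hc' := by
          have := hsuf c le_rfl
          simpa [List.getElem?_eq_getElem hc, List.getElem?_eq_getElem hc'] using this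
        have hdrop : ∀ d, c ≤ d → ls.drop d = ls'.drop d := by
          intro d hd
          apply List.ext_getElem?
          intro mm
          rw [List.getElem?_drop, List.getElem?_drop]
          exact hsuf (d + mm) (by omega)
        have hfe : pvFindEnd ls (c + 1) = pvFindEnd ls' (c + 1) :=
          pvFindEnd_congr (ls.length - (c + 1)) ls ls' (c + 1) le_rfl hlen
            (fun i hi => hsuf i (by omega))
        have hfg := pvFindEnd_ge ls (c + 1)
        conv_lhs => rw [pvRender]
        conv_rhs => rw [pvRender]
        rw [dif_pos hc, dif_pos hc']
        simp only [hget, ← hfe, ← hlen]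
        split
        · split
          · have hWeq : pvW ls c (pvFindEnd ls (c + 1)) = pvW ls' c (pvFindEnd ls (c + 1)) := by
              unfold pvW
              rw [hdrop (c + 1) (by omega)]
            rw [hWeq, hdrop (c + 1) (by omega),
                ih ls ls' (pvFindEnd ls (c + 1) + 1) (by omega) hlen
                  (fun i hi => hsuf i (by omega))]
          · exact hdrop c le_rfl
        · rw [ih ls ls' (c + 1) (by omega) hlen (fun i hi => hsuf i (by omega))]
      · conv_lhs => rw [pvRender]
        conv_rhs => rw [pvRender]
        rw [dif_neg hc, dif_neg (by omega)]

-- MAIN (A-side): from a closed state at i, drawing all ranges the scan finds rewrites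
-- exactly the suffix from i into pvRender.
lemma pvMain : ∀ (n : Nat) (ls : List String) (i b : Nat), ls.length - i ≤ n →
    (pvScanA ls i false b []).foldl (fun acc r => pvDrawA acc r.1 r.2) ls
      = ls.take i ++ pvRender ls i := by
  intro n
  induction n with
  | zero =>
      intro ls i b h
      rw [pvScanA, dif_neg (by omega), pvRender, dif_neg (by omega)]
      simp [List.take_of_length_le (show ls.length ≤ i by omega)]
  | succ m ih =>
      intro ls i b h
      by_cases hc : i < ls.length
      · rw [pvScanA, dif_pos hc]
        simp only [Bool.false_eq_true, if_false]
        by_cases hB : PySem.Str.startswith ls[i] "### FRAME BEGIN" = true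
        · rw [if_pos hB, pvScanA_open (ls.length - (i + 1)) ls (i + 1) i le_rfl]
          have hfg := pvFindEnd_ge ls (i + 1)
          by_cases hj : pvFindEnd ls (i + 1) < ls.length
          · rw [if_pos hj, List.foldl_cons]
            have hlen' : (pvDrawA ls i (pvFindEnd ls (i + 1))).length = ls.length :=
              pvDrawA_length ls i (pvFindEnd ls (i + 1))
            have hsuf : ∀ k, pvFindEnd ls (i + 1) + 1 ≤ k →
                (pvDrawA ls i (pvFindEnd ls (i + 1)))[k]? = ls[k]? :=
              fun k hk => pvDrawA_getElem?_high ls i (pvFindEnd ls (i + 1)) k (by omega) (by omega)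
            rw [pvScanA_congr_suffix (ls.length - (pvFindEnd ls (i + 1) + 1)) ls
                  (pvDrawA ls i (pvFindEnd ls (i + 1))) (pvFindEnd ls (i + 1) + 1) false i [] rfl
                  hlen'.symm (fun k hk => (hsuf k hk).symm),
                ih (pvDrawA ls i (pvFindEnd ls (i + 1))) (pvFindEnd ls (i + 1) + 1) i (by omega),
                pvRender_congr ((pvDrawA ls i (pvFindEnd ls (i + 1))).length - (pvFindEnd ls (i + 1) + 1))
                  (pvDrawA ls i (pvFindEnd ls (i + 1))) ls (pvFindEnd ls (i + 1) + 1) le_rfl hlen' hsuf]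
            have hdecomp := pvDrawA_decomp ls i (pvFindEnd ls (i + 1)) (by omega) hj
            have htake : (pvDrawA ls i (pvFindEnd ls (i + 1))).take (pvFindEnd ls (i + 1) + 1)
                = ls.take i ++ pvBorder (pvW ls i (pvFindEnd ls (i + 1)))
                    :: ((ls.drop (i + 1)).take (pvFindEnd ls (i + 1) - (i + 1))).map
                         (pvRow (pvW ls i (pvFindEnd ls (i + 1))))
                    ++ [pvBorder (pvW ls i (pvFindEnd ls (i + 1)))] := by
              rw [hdecomp,
                  show ls.take i ++ pvBorder (pvW ls i (pvFindEnd ls (i + 1)))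
                      :: ((ls.drop (i + 1)).take (pvFindEnd ls (i + 1) - (i + 1))).map
                           (pvRow (pvW ls i (pvFindEnd ls (i + 1))))
                      ++ pvBorder (pvW ls i (pvFindEnd ls (i + 1))) :: ls.drop (pvFindEnd ls (i + 1) + 1)
                    = (ls.take i ++ pvBorder (pvW ls i (pvFindEnd ls (i + 1)))
                        :: ((ls.drop (i + 1)).take (pvFindEnd ls (i + 1) - (i + 1))).map
                             (pvRow (pvW ls i (pvFindEnd ls (i + 1))))
                        ++ [pvBorder (pvW ls i (pvFindEnd ls (i + 1)))]) ++ ls.drop (pvFindEnd ls (i + 1) + 1)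
                    from by simp]
              rw [List.take_left' (by simp; omega)]
            rw [htake]
            conv_rhs => rw [pvRender]
            rw [dif_pos hc, if_pos hB, dif_pos hj]
            simp
          · rw [if_neg hj, List.foldl_nil, pvRender, dif_pos hc, if_pos hB, dif_neg hj,
                List.take_append_drop]
        · rw [if_neg hB, ih ls (i + 1) b (by omega)]
          conv_rhs => rw [pvRender]
          rw [dif_pos hc, if_neg hB,
              show List.take (i + 1) ls = List.take i ls ++ [ls[i]] from by
                rw [List.take_add_one, List.getElem?_eq_getElem hc]; rfl,
              List.append_assoc, List.singleton_append]
      · rw [pvScanA, dif_neg hc, pvRender, dif_neg hc]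
        simp [List.take_of_length_le (show ls.length ≤ i by omega)]

-- B-side: the accumulator is append-only and the loop emits pvRender.
lemma pvGoB_render : ∀ (n : Nat) (ls : List String) (i : Nat) (out : List String),
    ls.length - i ≤ n → pvGoB ls i out = out ++ pvRender ls i := by
  intro n
  induction n with
  | zero =>
      intro ls i out h
      rw [pvGoB, dif_neg (by omega), pvRender, dif_neg (by omega)]
      simp
  | succ m ih =>
      intro ls i out h
      by_cases hc : i < ls.length
      · rw [pvGoB, dif_pos hc]
        by_cases hB : PySem.Str.startswith ls[i] "### FRAME BEGIN" = true
        · rw [if_pos hB]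
          have hfg := pvFindEnd_ge ls (i + 1)
          show (if hj : pvFindEnd ls (i + 1) < ls.length then
              pvGoB ls (pvFindEnd ls (i + 1) + 1)
                (out ++ pvBorder (pvW ls i (pvFindEnd ls (i + 1)))
                  :: ((ls.drop (i + 1)).take (pvFindEnd ls (i + 1) - (i + 1))).map
                       (pvRow (pvW ls i (pvFindEnd ls (i + 1))))
                  ++ [pvBorder (pvW ls i (pvFindEnd ls (i + 1)))])
            else out ++ ls.drop i) = out ++ pvRender ls i
          by_cases hj : pvFindEnd ls (i + 1) < ls.length
          · rw [dif_pos hj, ih ls (pvFindEnd ls (i + 1) + 1) _ (by omega)]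
            conv_rhs => rw [pvRender]
            rw [dif_pos hc, if_pos hB, dif_pos hj]
            simp
          · rw [dif_neg hj, pvRender, dif_pos hc, if_pos hB, dif_neg hj]
        · rw [if_neg hB, ih ls (i + 1) _ (by omega)]
          conv_rhs => rw [pvRender]
          rw [dif_pos hc, if_neg hB]
          simp
      · rw [pvGoB, dif_neg hc, pvRender, dif_neg hc]
        simp

-- ===== VERDICT (by name: the statement is the Claim_ definition above) =====
theorem draw_frame_py_spec : Claim_equal_draw_frame_py := by
  intro lines _ _
  unfold Spec_draw_frame_py draw_frame_py draw_frame_py_alt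
  rw [pvMain lines.length lines 0 0 (by omega), pvGoB_render lines.length lines 0 [] (by omega)]
  simp
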